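-- pv_equiv track=rewrite | github.com/younesStrittmatter/sweetPeaBush | packages/peaGrow/src/bush/generate_factors.py | enumerate_domain_with_lag
-- ===== SOURCE A (Python) =====
-- from itertools import product
-- from typing import Dict, Sequence, List, Any, Union, Tuple, Iterable, Optional
--
-- def enumerate_domain_with_lag(
--     factors: Dict[str, Sequence[Any]],
--     lag: int = 0
-- ) -> Tuple[List[str], List[Tuple[Any, ...]], Dict[Tuple[Any, ...], int]]:
--     """
--     Build a domain over windows of length lag+1 using the provided subset of factors.
--     Order of tuple key is: (vals_t, vals_t-1, ..., vals_t-lag), flattened by factor order.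
--
--     Returns:
--         names: factor names in the insertion order of 'factors'
--         domain: list of flattened tuples (rows)
--         row_to_idx: mapping key -> row index
--     """
--     names = list(factors.keys())
--     per_t = [list(factors[n]) for n in names]                 # one time step
--     one = list(product(*per_t))                                # tuples of len(names)
--     window = list(product(*([one] * (lag + 1))))               # (lag+1)-fold cartesian
--     flat_domain: List[Tuple[Any, ...]] = []
--     for row in window:  # row is (vals_t, vals_t-1, ..., vals_t-lag), each a tuple of len(names)
--         flat = []
--         for r in row:
--             flat.extend(r)
--         flat_domain.append(tuple(flat))
--     row_to_idx = {row: i for i, row in enumerate(flat_domain)}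
--     return names, flat_domain, row_to_idx
-- ===== SOURCE B (Python) =====
-- def enumerate_domain_with_lag(factors, lag=0):
--     names = []
--     per_step = []
--     for name, vals in factors.items():
--         names.append(name)
--         per_step.append(list(vals))
--     # grow flat rows directly: lag+1 passes, each extending every partial row by one factor
--     rows = [()]
--     for _ in range(lag + 1):
--         for vals in per_step:
--             rows = [r + (v,) for r in rows for v in vals]
--     row_to_idx = {}
--     i = 0
--     for row in rows:
--         row_to_idx[row] = i
--         i += 1
--     return names, rows, row_to_idx
-- ===== Notes on version B (the rewrite author's own statement) =====
-- stated objective: alternative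
-- what changed: B never calls itertools.product or builds the intermediate one/window lists: it grows the flat rows incrementally (a fold extending every partial row by one factor value, lag+1 passes over the per-step lists) and builds the index dict with an explicit counter loop instead of enumerate over a comprehension.
import Mathlib
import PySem

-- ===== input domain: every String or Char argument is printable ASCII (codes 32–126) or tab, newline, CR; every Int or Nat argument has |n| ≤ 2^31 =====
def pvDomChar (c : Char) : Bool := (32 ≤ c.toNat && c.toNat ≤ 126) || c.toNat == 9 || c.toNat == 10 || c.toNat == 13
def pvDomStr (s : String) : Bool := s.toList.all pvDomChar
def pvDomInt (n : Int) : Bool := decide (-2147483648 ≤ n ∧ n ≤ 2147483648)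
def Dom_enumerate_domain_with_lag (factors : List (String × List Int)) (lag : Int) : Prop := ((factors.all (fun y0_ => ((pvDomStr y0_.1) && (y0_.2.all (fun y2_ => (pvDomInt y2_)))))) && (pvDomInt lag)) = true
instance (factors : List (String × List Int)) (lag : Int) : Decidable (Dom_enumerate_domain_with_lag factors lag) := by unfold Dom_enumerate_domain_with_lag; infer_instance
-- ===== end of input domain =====

-- B avoids itertools.product entirely: it grows the flat rows incrementally by repeated
-- extension passes and indexes them with an explicit counter loop. Same cost class.

-- ===== PORT A =====
-- itertools.product over a list of "iterables" (tuples modelled as lists), hand-ported: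
-- exact CPython order (first factor varies slowest, last fastest); product() of nothing is [()].
def pyProduct {α : Type} : List (List α) → List (List α)
  | [] => [[]]
  | l :: rest => l.flatMap (fun x => (pyProduct rest).map (x :: ·))

def enumerate_domain_with_lag (factors : List (String × List Int)) (lag : Int) : List String × List (List Int) × (List (List Int × Int)) :=
  let d := PySem.Dict.ofList factors
  let names := d.keys
  let per_t := names.map (fun n => d.getD n [])
  let one := pyProduct per_t
  let window := pyProduct (PySem.List.pyRepeat [one] (lag + 1))
  let flat_domain := window.map (fun row => row.foldl (fun flat r => flat ++ r) [])
  let row_to_idx := (PySem.List.enumerate flat_domain).foldl (fun m p => m.insert p.2 p.1) PySem.Dict.empty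
  (names, flat_domain, row_to_idx.items)

-- ===== PORT B =====
def enumerate_domain_with_lag_alt (factors : List (String × List Int)) (lag : Int) : List String × List (List Int) × (List (List Int × Int)) :=
  let d := PySem.Dict.ofList factors
  let np := d.items.foldl (fun (st : List String × List (List Int)) p => (st.1 ++ [p.1], st.2 ++ [p.2])) ([], [])
  let rows := (PySem.List.pyRange 0 (lag + 1) 1).foldl
      (fun rows _ => np.2.foldl (fun rows vals => rows.flatMap (fun r => vals.map (fun v => r ++ [v]))) rows)
      [[]]
  let st := rows.foldl (fun (st : PySem.Dict (List Int) Int × Int) row => (st.1.insert row st.2, st.2 + 1)) (PySem.Dict.empty, 0)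
  (np.1, rows, st.1.items)

-- ===== PRECONDITION & SPEC =====
def Spec_enumerate_domain_with_lag (factors : List (String × List Int)) (lag : Int) (out : List String × List (List Int) × (List (List Int × Int))) : Prop := out = enumerate_domain_with_lag_alt factors lag
instance (factors : List (String × List Int)) (lag : Int) (out : List String × List (List Int) × (List (List Int × Int))) : Decidable (Spec_enumerate_domain_with_lag factors lag out) := by unfold Spec_enumerate_domain_with_lag; infer_instance

-- ===== CLAIM (what is proved, stated in full; the proofs are below) =====
def Claim_equal_enumerate_domain_with_lag : Prop := ∀ (factors : List (String × List Int)) (lag : Int), Dom_enumerate_domain_with_lag factors lag → Spec_enumerate_domain_with_lag factors lag (enumerate_domain_with_lag factors lag)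

-- ===== LEMMAS AND PROOFS =====

theorem pyProduct_append {α : Type} (xs ys : List (List α)) :
    pyProduct (xs ++ ys) = (pyProduct xs).flatMap (fun a => (pyProduct ys).map (a ++ ·)) := by
  induction xs with
  | nil => simp [pyProduct]
  | cons l rest ih =>
      simp [pyProduct, ih, List.flatMap_assoc, List.map_flatMap, List.flatMap_map,
        List.map_map, Function.comp_def]

-- nesting the block-product and flattening each window gives the flat product over the repeats
theorem pyProduct_replicate_flatten {α : Type} (k : Nat) (per : List (List α)) :
    (pyProduct (List.replicate k (pyProduct per))).map List.flatten
      = pyProduct ((List.replicate k per).flatten) := by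
  induction k with
  | zero => simp [pyProduct]
  | succ k ih =>
      rw [List.replicate_succ, List.replicate_succ, List.flatten_cons, pyProduct_append, pyProduct]
      simp only [List.map_flatMap, List.map_map, Function.comp_def, List.flatten_cons]
      rw [← ih]
      simp [List.map_map, Function.comp_def]

-- B's extension fold over a list of factor lists is a flat product appended to each accumulator row
theorem foldl_extend_eq_pyProduct {α : Type} (ls : List (List α)) (acc : List (List α)) :
    ls.foldl (fun rows vals => rows.flatMap (fun r => vals.map (fun v => r ++ [v]))) acc
      = acc.flatMap (fun a => (pyProduct ls).map (a ++ ·)) := by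
  induction ls generalizing acc with
  | nil => simp [pyProduct]
  | cons l ls ih =>
      simp only [List.foldl_cons, ih, pyProduct]
      simp [List.flatMap_assoc, List.map_flatMap, List.flatMap_map, List.map_map,
        Function.comp_def, List.append_assoc]

-- B's outer pass loop only uses the length of its index list
theorem foldl_passes_eq_flatten_replicate {α : Type} (per : List (List α)) (idx : List Int)
    (acc : List (List α)) :
    idx.foldl (fun rows _ =>
        per.foldl (fun rows vals => rows.flatMap (fun r => vals.map (fun v => r ++ [v]))) rows) acc
      = ((List.replicate idx.length per).flatten).foldl
          (fun rows vals => rows.flatMap (fun r => vals.map (fun v => r ++ [v]))) acc := by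
  induction idx generalizing acc with
  | nil => simp
  | cons i idx ih =>
      simp only [List.foldl_cons, ih, List.length_cons, List.replicate_succ, List.flatten_cons,
        List.foldl_append]

-- B's names/per-step building loop
theorem foldl_pairs_eq_maps (l : List (String × List Int)) (a : List String) (b : List (List Int)) :
    l.foldl (fun (st : List String × List (List Int)) p => (st.1 ++ [p.1], st.2 ++ [p.2])) (a, b)
      = (a ++ l.map Prod.fst, b ++ l.map Prod.snd) := by
  induction l generalizing a b with
  | nil => simp
  | cons p l ih => simp [ih]

-- B's counter loop builds the same dict as A's enumerate loop
theorem foldl_counter_eq_enumerate (xs : List (List Int)) (d : PySem.Dict (List Int) Int) (i : Int) :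
    (xs.foldl (fun (st : PySem.Dict (List Int) Int × Int) row => (st.1.insert row st.2, st.2 + 1)) (d, i)).1
      = (PySem.List.enumerate xs i).foldl (fun m p => m.insert p.2 p.1) d := by
  induction xs generalizing d i with
  | nil => simp [PySem.List.enumerate_nil]
  | cons x xs ih => simp [PySem.List.enumerate_cons, ih]

-- ===== VERDICT (by name: the statement is the Claim_ definition above) =====
theorem enumerate_domain_with_lag_spec : Claim_equal_enumerate_domain_with_lag := by
  intro factors lag _
  unfold Spec_enumerate_domain_with_lag enumerate_domain_with_lag enumerate_domain_with_lag_alt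
  dsimp only
  rw [foldl_pairs_eq_maps]
  dsimp only
  simp only [List.nil_append]
  have hper : (PySem.Dict.ofList factors).keys.map (fun n => (PySem.Dict.ofList factors).getD n [])
      = (PySem.Dict.ofList factors).items.map Prod.snd := by
    rw [← PySem.Dict.values_eq_map_keys (PySem.Dict.ofList factors) (PySem.Dict.nodup_keys_ofList factors) []]
    rfl
  have hrows :
      (PySem.List.pyRange 0 (lag + 1) 1).foldl
        (fun rows _ => ((PySem.Dict.ofList factors).items.map Prod.snd).foldl
            (fun rows vals => rows.flatMap (fun r => vals.map (fun v => r ++ [v]))) rows) [[]]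
      = (pyProduct (PySem.List.pyRepeat
            [pyProduct ((PySem.Dict.ofList factors).keys.map (fun n => (PySem.Dict.ofList factors).getD n []))]
            (lag + 1))).map (fun row => row.foldl (fun flat r => flat ++ r) []) := by
    rw [foldl_passes_eq_flatten_replicate, foldl_extend_eq_pyProduct]
    have hflat : ∀ (row : List (List Int)),
        row.foldl (fun flat r => flat ++ r) [] = row.flatten := fun row => by
      simpa using PySem.List.foldl_append_eq_flatten (xs := row) (acc := [])
    simp only [hflat, PySem.List.pyRepeat_singleton, pyProduct_replicate_flatten, hper,
      PySem.List.length_pyRange_one]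
    simp
  have hnames : (PySem.Dict.ofList factors).items.map Prod.fst = (PySem.Dict.ofList factors).keys := rfl
  rw [hrows, foldl_counter_eq_enumerate, hnames]
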